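-- pv_equiv track=rewrite | github.com/gimdongwon/Catch_python_tmi | Chaebeen/6th/String_sort/solution.py | solution
-- ===== SOURCE A (Python) =====
-- def solution(s):
--     num = 0
--     string = []
--
--     for i in s:
--         if ord(i) <= 57:
--             num += int(i)
--         else:
--             string.append(i)
--     string.sort()
--     if num != 0:
--         string.append(str(num))
--
--     return ''.join(string)
-- ===== SOURCE B (Python) =====
-- def solution(s):
--     num = 0
--     counts = {}
--     for ch in s:
--         o = ord(ch)
--         if 48 <= o <= 57:
--             num += o - 48
--         else:
--             counts[o] = counts.get(o, 0) + 1
--     parts = []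
--     if counts:
--         for o in range(min(counts), max(counts) + 1):
--             parts.append(chr(o) * counts.get(o, 0))
--     if num != 0:
--         parts.append(str(num))
--     return ''.join(parts)
-- ===== Notes on version B (the rewrite author's own statement) =====
-- stated objective: faster
-- what changed: B keeps the single partition pass but replaces list.sort() on the collected non-digit characters with a counting sort: it builds a dict ordinal->multiplicity and rebuilds the sorted sequence by walking the ordinals from min(counts) to max(counts), emitting each character multiplicity times; the digit sum is computed arithmetically (ord minus 48) instead of via int().
import Mathlib
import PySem

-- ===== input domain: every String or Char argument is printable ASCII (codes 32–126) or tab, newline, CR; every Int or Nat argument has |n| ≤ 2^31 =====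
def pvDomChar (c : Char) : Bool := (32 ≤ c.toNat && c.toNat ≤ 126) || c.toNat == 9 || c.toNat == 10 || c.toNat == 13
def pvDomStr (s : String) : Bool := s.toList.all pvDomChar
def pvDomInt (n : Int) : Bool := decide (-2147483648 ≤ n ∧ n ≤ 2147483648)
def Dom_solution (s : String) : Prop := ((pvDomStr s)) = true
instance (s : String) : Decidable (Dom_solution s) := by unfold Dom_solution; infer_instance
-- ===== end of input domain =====

-- B replaces A's comparison sort of the collected non-digit characters with a counting sort over a
-- dict ordinal -> multiplicity, rebuilt in ascending ordinal order (objective: faster, measured).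

-- ===== PORT A =====
-- The Python appends single-character strings and possibly str(num) to one list and joins it; the
-- port keeps the characters as a List Char (every list element is a single character at sort time,
-- so sorting the characters is exact) and appends str(num)'s characters before String.mk (''.join).
-- int(i) is PySem.Int.ofChars? [i]; its none case (ValueError) is excluded by Pre_solution.
def solution (s : String) : String :=
  let st := s.toList.foldl
    (fun (acc : Int × List Char) i =>
      if i.toNat ≤ 57 then (acc.1 + (PySem.Int.ofChars? [i]).getD 0, acc.2)
      else (acc.1, acc.2 ++ [i]))
    ((0 : Int), ([] : List Char))
  let sortedChars := PySem.List.sorted st.2 (fun c => c) false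
  String.mk (sortedChars ++ (if st.1 ≠ 0 then PySem.Int.toChars st.1 else []))

-- ===== PORT B =====
-- counts is a dict ordinal -> multiplicity; 'chr(o) * counts.get(o, 0)' is pyRepeat;
-- ''.join of the parts is the concatenation, with str(num)'s characters appended.
def solution_alt (s : String) : String :=
  let st := s.toList.foldl
    (fun (acc : Int × PySem.Dict Int Int) ch =>
      let o : Int := (ch.toNat : Int)
      if 48 ≤ o ∧ o ≤ 57 then (acc.1 + (o - 48), acc.2)
      else (acc.1, acc.2.modify o 0 (· + 1)))
    ((0 : Int), (PySem.Dict.empty : PySem.Dict Int Int))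
  let parts : List Char :=
    if st.2.items = [] then []
    else
      let lo := (PySem.List.min? st.2.keys (fun x => x)).getD 0
      let hi := (PySem.List.max? st.2.keys (fun x => x)).getD 0
      (PySem.List.pyRange lo (hi + 1) 1).foldl
        (fun acc o => acc ++ PySem.List.pyRepeat [Char.ofNat o.toNat] (st.2.getD o 0)) []
  String.mk (parts ++ (if st.1 ≠ 0 then PySem.Int.toChars st.1 else []))

-- ===== PRECONDITION & SPEC =====
-- Pre_ excludes exactly the strings containing a character with code < 48 (space, tab, newline,
-- codes 32-47): there ord(i) <= 57 holds but i is no digit, so A's int(i) raises ValueError.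
def Pre_solution (s : String) : Prop := (s.toList.all (fun c => 48 ≤ c.toNat)) = true
instance (s : String) : Decidable (Pre_solution s) := by unfold Pre_solution; infer_instance
def pvWitness_solution : String := "ba21c"

def Spec_solution (s : String) (out : String) : Prop := out = solution_alt s
instance (s : String) (out : String) : Decidable (Spec_solution s out) := by unfold Spec_solution; infer_instance

-- ===== CLAIM (what is proved, stated in full; the proofs are below) =====
def Claim_equal_solution : Prop := ∀ (s : String), Dom_solution s → Pre_solution s → Spec_solution s (solution s)

-- ===== LEMMAS AND PROOFS =====

theorem toNat_ofNat_small (n : Nat) (hn : n < 55296) : (Char.ofNat n).toNat = n := by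
  have hvalid : n.isValidChar := Or.inl hn
  simp only [Char.toNat, Char.ofNat, dif_pos hvalid]
  simp

theorem char_of_toNat (c : Char) (n : Nat) (hn : n < 55296) (h : c.toNat = n) : c = Char.ofNat n := by
  have hvalid : n.isValidChar := Or.inl hn
  apply Char.ext
  apply UInt32.toNat_inj.mp
  simp only [Char.toNat] at h
  rw [h, Char.ofNat, dif_pos hvalid]
  simp

theorem chr_le (n m : Nat) (h : n ≤ m) (hm : m < 55296) : Char.ofNat n ≤ Char.ofNat m := by
  apply Char.le_def.mpr
  apply UInt32.le_iff_toNat_le.mpr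
  have h1 := toNat_ofNat_small n (by omega)
  have h2 := toNat_ofNat_small m hm
  simp only [Char.toNat] at h1 h2
  omega

theorem digit_val (c : Char) (h1 : 48 ≤ c.toNat) (h2 : c.toNat ≤ 57) :
    PySem.Int.ofChars? [c] = some ((c.toNat : Int) - 48) := by
  have h : c.toNat = 48 ∨ c.toNat = 49 ∨ c.toNat = 50 ∨ c.toNat = 51 ∨ c.toNat = 52 ∨
      c.toNat = 53 ∨ c.toNat = 54 ∨ c.toNat = 55 ∨ c.toNat = 56 ∨ c.toNat = 57 := by omega
  rcases h with h|h|h|h|h|h|h|h|h|h <;>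
    rw [char_of_toNat c _ (by omega) h] <;> decide

theorem foldA_eq (L : List Char) (n : Int) (acc : List Char) :
    L.foldl
      (fun (acc : Int × List Char) i =>
        if i.toNat ≤ 57 then (acc.1 + (PySem.Int.ofChars? [i]).getD 0, acc.2)
        else (acc.1, acc.2 ++ [i])) (n, acc)
    = (n + ((L.filter (fun c => decide (c.toNat ≤ 57))).map
          (fun c => (PySem.Int.ofChars? [c]).getD 0)).sum,
       acc ++ L.filter (fun c => !decide (c.toNat ≤ 57))) := by
  induction L generalizing n acc with
  | nil => simp
  | cons c t ih =>
    rw [List.foldl_cons]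
    by_cases h : c.toNat ≤ 57
    · rw [if_pos h, ih]
      simp [List.filter_cons, h]
      ring
    · rw [if_neg h, ih]
      simp [List.filter_cons, h]

theorem foldB_eq (L : List Char) (n : Int) (d : PySem.Dict Int Int) :
    L.foldl
      (fun (acc : Int × PySem.Dict Int Int) ch =>
        let o : Int := (ch.toNat : Int)
        if 48 ≤ o ∧ o ≤ 57 then (acc.1 + (o - 48), acc.2)
        else (acc.1, acc.2.modify o 0 (· + 1))) (n, d)
    = (n + ((L.filter (fun c => decide (48 ≤ c.toNat ∧ c.toNat ≤ 57))).map
          (fun c => ((c.toNat : Int) - 48))).sum,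
       ((L.filter (fun c => !decide (48 ≤ c.toNat ∧ c.toNat ≤ 57))).map
          (fun c => (c.toNat : Int))).foldl (fun d o => d.modify o 0 (· + 1)) d) := by
  induction L generalizing n d with
  | nil => simp
  | cons c t ih =>
    rw [List.foldl_cons]
    by_cases h : 48 ≤ c.toNat ∧ c.toNat ≤ 57
    · have h' : 48 ≤ ((c.toNat : Int)) ∧ ((c.toNat : Int)) ≤ 57 := by omega
      simp only [if_pos h']
      rw [ih]
      simp [List.filter_cons, h]
      ring
    · have h' : ¬ (48 ≤ ((c.toNat : Int)) ∧ ((c.toNat : Int)) ≤ 57) := by omega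
      simp only [if_neg h']
      rw [ih]
      simp [List.filter_cons, h]
      rw [if_pos (show c.toNat < 48 ∨ 57 < c.toNat by omega)]
      rw [List.map_cons, List.foldl_cons]

theorem flatMap_replicate_count_perm (R : List Int) : ∀ (l : List Int), R.Nodup →
    (∀ x ∈ l, x ∈ R) →
    (R.flatMap fun o => List.replicate (l.count o) o).Perm l := by
  induction R with
  | nil =>
    intro l _ hsub
    have : l = [] := by
      cases l with
      | nil => rfl
      | cons a t => exact absurd (hsub a (by simp)) (by simp)
    simp [this]
  | cons o R' ih =>
    intro l hnd hsub
    rw [List.flatMap_cons]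
    have hndR' : R'.Nodup := hnd.of_cons
    have honR' : o ∉ R' := (List.nodup_cons.mp hnd).1
    have hcongr : (R'.flatMap fun o' => List.replicate ((l.filter (fun x => !(x == o))).count o') o')
        = R'.flatMap fun o' => List.replicate (l.count o') o' := by
      apply List.flatMap_congr
      intro o' ho'
      have : (l.filter (fun x => !(x == o))).count o' = l.count o' := by
        rw [List.count_filter]
        simp [show ¬ o' = o from fun h => honR' (h ▸ ho')]
      rw [this]
    have hperm' : (R'.flatMap fun o' => List.replicate ((l.filter (fun x => !(x == o))).count o') o').Perm
        (l.filter (fun x => !(x == o))) := by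
      apply ih _ hndR'
      intro x hx
      rcases List.mem_filter.mp hx with ⟨hxl, hne⟩
      rcases List.mem_cons.mp (hsub x hxl) with h | h
      · exact absurd h (by simpa using hne)
      · exact h
    rw [← hcongr, ← List.filter_beq]
    exact (hperm'.append_left (l.filter (· == o))).trans (List.filter_append_perm _ l)

theorem counting_sort (D : List Char) (hD : D ≠ []) (hdom : ∀ c ∈ D, c.toNat < 55296) :
    (PySem.List.pyRange
        ((PySem.List.min? (PySem.Dict.counter (D.map (fun c => (c.toNat : Int)))).keys (fun x => x)).getD 0)
        (((PySem.List.max? (PySem.Dict.counter (D.map (fun c => (c.toNat : Int)))).keys (fun x => x)).getD 0) + 1) 1).foldl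
      (fun acc o => acc ++ PySem.List.pyRepeat [Char.ofNat o.toNat]
        ((PySem.Dict.counter (D.map (fun c => (c.toNat : Int)))).getD o 0)) []
    = PySem.List.sorted D (fun c => c) false := by
  set ords := D.map (fun c => (c.toNat : Int)) with hords
  have hkeys : (PySem.Dict.counter ords).keys = PySem.Set.ofList ords := PySem.Dict.keys_counter ords
  have hmemk : ∀ x, x ∈ (PySem.Dict.counter ords).keys ↔ x ∈ ords := by
    intro x; rw [hkeys]; exact PySem.Set.mem_ofList (α := Int) (y := x) (xs := ords)
  obtain ⟨c0, hc0⟩ : ∃ c, c ∈ D := by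
    cases D with
    | nil => exact absurd rfl hD
    | cons a t => exact ⟨a, by simp⟩
  have hkne : (PySem.Dict.counter ords).keys ≠ [] := by
    intro hk
    have : ((c0.toNat : Int)) ∈ (PySem.Dict.counter ords).keys := by
      rw [hmemk]; exact List.mem_map_of_mem hc0
    rw [hk] at this; exact absurd this (by simp)
  obtain ⟨lo, hmin⟩ : ∃ lo, PySem.List.min? (PySem.Dict.counter ords).keys (fun x => x) = some lo := by
    cases h : PySem.List.min? (PySem.Dict.counter ords).keys (fun x => x) with
    | none => exact absurd ((PySem.List.min?_eq_none_iff _ _).mp h) hkne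
    | some lo => exact ⟨lo, rfl⟩
  obtain ⟨hi, hmax⟩ : ∃ hi, PySem.List.max? (PySem.Dict.counter ords).keys (fun x => x) = some hi := by
    cases h : PySem.List.max? (PySem.Dict.counter ords).keys (fun x => x) with
    | none => exact absurd ((PySem.List.max?_eq_none_iff _ _).mp h) hkne
    | some hi => exact ⟨hi, rfl⟩
  rw [hmin, hmax]
  simp only [Option.getD_some]
  have hlo_mem : lo ∈ ords := (hmemk lo).mp (PySem.List.min?_mem hmin)
  have hhi_mem : hi ∈ ords := (hmemk hi).mp (PySem.List.max?_mem hmax)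
  have hlo_min : ∀ y ∈ ords, lo ≤ y := by
    intro y hy; exact PySem.List.min?_isMin hmin y ((hmemk y).mpr hy)
  have hhi_max : ∀ y ∈ ords, y ≤ hi := by
    intro y hy; exact PySem.List.max?_isMax hmax y ((hmemk y).mpr hy)
  have hbound : ∀ x ∈ ords, 0 ≤ x ∧ x < 55296 := by
    intro x hx
    obtain ⟨c, hc, rfl⟩ := List.mem_map.mp hx
    exact ⟨Int.natCast_nonneg _, by exact_mod_cast hdom c hc⟩
  have h0lo : 0 ≤ lo := (hbound lo hlo_mem).1
  have hhilt : hi < 55296 := (hbound hi hhi_mem).2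
  set R := PySem.List.pyRange lo (hi + 1) 1 with hR
  have hsub : ∀ x ∈ ords, x ∈ R := by
    intro x hx
    exact PySem.List.mem_pyRange_one.mpr ⟨hlo_min x hx, by have := hhi_max x hx; omega⟩
  have hndR : R.Nodup := PySem.List.nodup_pyRange_one lo (hi + 1)
  have hRbound : ∀ o ∈ R, lo ≤ o ∧ o < hi + 1 := fun o ho => PySem.List.mem_pyRange_one.mp ho
  rw [PySem.List.foldl_append_eq_flatMap]
  rw [List.nil_append]
  have hflat : (R.flatMap fun o => PySem.List.pyRepeat [Char.ofNat o.toNat] ((PySem.Dict.counter ords).getD o 0))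
      = R.flatMap fun o => List.replicate (ords.count o) (Char.ofNat o.toNat) := by
    apply List.flatMap_congr
    intro o _
    rw [PySem.Dict.getD_counter, PySem.List.pyRepeat_singleton, Int.toNat_natCast]
  rw [hflat]
  have hFm : (R.flatMap fun o => List.replicate (ords.count o) (Char.ofNat o.toNat))
      = (R.flatMap fun o => List.replicate (ords.count o) o).map (fun o => Char.ofNat o.toNat) := by
    rw [List.map_flatMap]
    apply List.flatMap_congr
    intro o _
    rw [List.map_replicate]
  have hmapD : ords.map (fun o => Char.ofNat o.toNat) = D := by
    rw [hords, List.map_map]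
    have : ∀ c ∈ D, Char.ofNat ((c.toNat : Int)).toNat = c := by
      intro c hc
      rw [Int.toNat_natCast]
      exact (char_of_toNat c c.toNat (hdom c hc) rfl).symm
    calc D.map ((fun o => Char.ofNat o.toNat) ∘ fun c => ((c.toNat : Int)))
        = D.map id := List.map_congr_left (fun c hc => this c hc)
      _ = D := List.map_id D
  have hpermD : (R.flatMap fun o => List.replicate (ords.count o) (Char.ofNat o.toNat)).Perm D := by
    rw [hFm, ← hmapD]
    exact (flatMap_replicate_count_perm R ords hndR hsub).map _
  have hpair : (R.flatMap fun o => List.replicate (ords.count o) (Char.ofNat o.toNat)).Pairwise (· ≤ ·) := by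
    rw [List.flatMap_def]
    apply List.pairwise_flatten.mpr
    constructor
    · intro l hl
      obtain ⟨o, _, rfl⟩ := List.mem_map.mp hl
      exact List.pairwise_replicate_of_refl
    · apply List.pairwise_map.mpr
      apply List.Pairwise.imp_of_mem ?_ (PySem.List.pairwise_lt_pyRange_one lo (hi + 1))
      intro o1 o2 h1mem h2mem hlt x hx y hy
      rw [List.eq_of_mem_replicate hx, List.eq_of_mem_replicate hy]
      have b1 := hRbound o1 h1mem
      have b2 := hRbound o2 h2mem
      exact chr_le o1.toNat o2.toNat (by omega) (by omega)
  have hsortpair : (PySem.List.sorted D (fun c => c) false).Pairwise (· ≤ ·) := by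
    have := PySem.List.sorted_pairwise D (fun c => c)
    simpa using this
  exact PySem.List.eq_of_perm_of_pairwise_le_of_injective (fun c => c) (fun a b h => h)
    (hpermD.trans (PySem.List.sorted_perm D (fun c => c) false).symm) (by simpa using hpair) hsortpair

theorem solution_main (s : String) (hdom : Dom_solution s) (hpre0 : Pre_solution s) :
    solution s = solution_alt s := by
  have hpre : ∀ c ∈ s.toList, 48 ≤ c.toNat := by
    intro c hc
    have := List.all_eq_true.mp hpre0 c hc
    simpa using this
  unfold solution solution_alt
  rw [foldA_eq, foldB_eq]
  rw [← PySem.Dict.counter_eq_foldl]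
  simp only
  have hfilt1 : s.toList.filter (fun c => decide (c.toNat ≤ 57))
      = s.toList.filter (fun c => decide (48 ≤ c.toNat ∧ c.toNat ≤ 57)) := by
    apply List.filter_congr
    intro c hc
    have := hpre c hc
    by_cases h : c.toNat ≤ 57 <;> simp [h, this]
  have hfilt2 : s.toList.filter (fun c => !decide (c.toNat ≤ 57))
      = s.toList.filter (fun c => !decide (48 ≤ c.toNat ∧ c.toNat ≤ 57)) := by
    apply List.filter_congr
    intro c hc
    have := hpre c hc
    by_cases h : c.toNat ≤ 57 <;> simp [h, this]
  have hnum : (s.toList.filter (fun c => decide (c.toNat ≤ 57))).map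
        (fun c => (PySem.Int.ofChars? [c]).getD 0)
      = (s.toList.filter (fun c => decide (48 ≤ c.toNat ∧ c.toNat ≤ 57))).map
        (fun c => ((c.toNat : Int) - 48)) := by
    rw [hfilt1]
    apply List.map_congr_left
    intro c hc
    rcases List.mem_filter.mp hc with ⟨_, hdec⟩
    have hb : 48 ≤ c.toNat ∧ c.toNat ≤ 57 := of_decide_eq_true hdec
    rw [digit_val c hb.1 hb.2]
    rfl
  rw [hnum, hfilt2]
  simp only [List.nil_append, zero_add]
  set Dn := s.toList.filter (fun c => !decide (48 ≤ c.toNat ∧ c.toNat ≤ 57)) with hDn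
  by_cases hempty : Dn = []
  · rw [hempty]
    simp [show (PySem.List.sorted ([] : List Char) (fun c => c) false) = [] from
      (PySem.List.sorted_eq_nil_iff _ _ _).mpr rfl]
  · have hne : (PySem.Dict.counter (Dn.map (fun c => (c.toNat : Int)))).items ≠ [] := by
      rw [PySem.Dict.items_counter]
      intro h
      rcases Dn with _ | ⟨c, t⟩
      · exact hempty rfl
      · have : ((c.toNat : Int)) ∈ PySem.Set.ofList ((c :: t).map (fun c => (c.toNat : Int))) := by
          rw [PySem.Set.mem_ofList]
          simp
        rw [List.map_eq_nil_iff.mp h] at this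
        exact absurd this (by simp)
    rw [if_neg hne]
    have hdomD : ∀ c ∈ Dn, c.toNat < 55296 := by
      intro c hc
      have hcl : c ∈ s.toList := (List.mem_filter.mp hc).1
      unfold Dom_solution pvDomStr at hdom
      have := List.all_eq_true.mp hdom c hcl
      simp [pvDomChar] at this
      omega
    rw [counting_sort Dn hempty hdomD]

-- ===== VERDICT (by name: the statement is the Claim_ definition above) =====
theorem solution_spec : Claim_equal_solution := by
  intro s hdom hpre
  unfold Spec_solution
  exact solution_main s hdom hpre
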